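-- pv_equiv track=rewrite | github.com/Vikram-kaki/DS | Testing/Testing2.py | war
-- ===== SOURCE A (Python) =====
-- def war(m, n, targets, column_indices, row_pointers):
--     matrix = []
--     for i in range(m):
--         matrix.append(['z'] * n)
--
--     for i in range(m):
--         for j in range(row_pointers[i], row_pointers[i + 1]):
--             matrix[i][column_indices[j]] = targets[j]
--
--     return matrix
-- ===== SOURCE B (Python) =====
-- def war(m, n, targets, column_indices, row_pointers):
--     # Mutation-free brute force: instead of preallocating rows and scattering
--     # CSR entries into them, compute each cell directly by scanning the row's
--     # CSR slice in reverse for the first entry hitting that column (= A's last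
--     # write), defaulting to 'z'.
--     matrix = []
--     for i in range(m):
--         lo, hi = row_pointers[i], row_pointers[i + 1]
--         matrix.append([next((targets[j] for j in reversed(range(lo, hi))
--                              if column_indices[j] == c), 'z')
--                        for c in range(n)])
--     return matrix
-- ===== Notes on version B (the rewrite author's own statement) =====
-- stated objective: alternative
-- what changed: Replaces preallocate-then-scatter mutation with a mutation-free direct formula per cell: each matrix[i][c] is found by scanning the row's CSR slice in reverse for the first entry whose column equals c (equivalent to A's last overwrite), defaulting to 'z'.
-- outside the precondition, e.g. on war(1, 1, ['a'], [-1], [0, 1]): A returns [['a']], B returns [['z']]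
import Mathlib
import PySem

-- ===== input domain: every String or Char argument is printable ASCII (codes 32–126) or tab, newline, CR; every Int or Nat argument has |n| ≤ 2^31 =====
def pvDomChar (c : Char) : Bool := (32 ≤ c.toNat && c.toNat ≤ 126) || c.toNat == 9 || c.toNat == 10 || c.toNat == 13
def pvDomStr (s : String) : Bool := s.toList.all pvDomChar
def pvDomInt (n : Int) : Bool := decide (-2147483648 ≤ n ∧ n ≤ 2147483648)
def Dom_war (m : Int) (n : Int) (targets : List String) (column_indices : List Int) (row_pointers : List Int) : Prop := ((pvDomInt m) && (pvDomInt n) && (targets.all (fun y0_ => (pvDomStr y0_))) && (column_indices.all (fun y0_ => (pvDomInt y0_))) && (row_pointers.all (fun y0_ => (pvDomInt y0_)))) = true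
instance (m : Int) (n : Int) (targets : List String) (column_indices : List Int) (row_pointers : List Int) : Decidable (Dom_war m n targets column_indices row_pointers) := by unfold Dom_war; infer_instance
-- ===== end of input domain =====

-- B replaces A's preallocate-then-scatter with a mutation-free per-cell computation:
-- each cell scans its row's CSR slice in reverse for the first matching column
-- (= A's last write), default 'z' (alternative decomposition); return values only.


-- ===== PORT A =====
-- literal port: build m rows of ['z']*n, then scatter matrix[i][column_indices[j]] = targets[j]
def war (m : Int) (n : Int) (targets : List String) (column_indices : List Int) (row_pointers : List Int) : List (List String) :=
  let matrix : List (List String) :=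
    (PySem.List.pyRange 0 m 1).foldl (fun acc _ => acc ++ [List.replicate n.toNat "z"]) []
  (PySem.List.pyRange 0 m 1).foldl (fun mat i =>
    (PySem.List.pyRange (PySem.List.pyGetD row_pointers i 0) (PySem.List.pyGetD row_pointers (i + 1) 0) 1).foldl
      (fun mat j =>
        PySem.List.pySetD mat i
          (PySem.List.pySetD (PySem.List.pyGetD mat i [])
            (PySem.List.pyGetD column_indices j 0) (PySem.List.pyGetD targets j "")))
      mat)
    matrix

-- ===== PORT B =====
-- literal port of Source B: per cell, first match in the reversed CSR slice, default 'z'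
def war_alt (m : Int) (n : Int) (targets : List String) (column_indices : List Int) (row_pointers : List Int) : List (List String) :=
  (PySem.List.pyRange 0 m 1).foldl (fun matrix i =>
    let lo := PySem.List.pyGetD row_pointers i 0
    let hi := PySem.List.pyGetD row_pointers (i + 1) 0
    matrix ++ [(PySem.List.pyRange 0 n 1).map (fun c =>
      match (PySem.List.pyRange lo hi 1).reverse.find?
              (fun j => PySem.List.pyGetD column_indices j 0 == c) with
      | some j => PySem.List.pyGetD targets j ""
      | none => "z")]) []

-- ===== PRECONDITION & SPEC =====
-- Pre_war: the inputs where Python A raises no IndexError (row-pointer reads and slice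
-- indices into targets/column_indices in range) AND every referenced column index is
-- in [0, n). Pre_ excludes inputs with a referenced NEGATIVE column index even though A
-- returns there: on such malformed CSR input A's Python wraparound write at position n+c
-- and B's leaving the column at 'z' are both accidental, unspecified behaviours.
def Pre_war (m : Int) (n : Int) (targets : List String) (column_indices : List Int) (row_pointers : List Int) : Prop :=
  m ≤ 0 ∨ (m < (row_pointers.length : Int) ∧
    ∀ i ∈ List.range m.toNat,
      row_pointers.getD (i + 1) 0 ≤ row_pointers.getD i 0 ∨
      (-(targets.length : Int) ≤ row_pointers.getD i 0 ∧
       row_pointers.getD (i + 1) 0 ≤ (targets.length : Int) ∧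
       -(column_indices.length : Int) ≤ row_pointers.getD i 0 ∧
       row_pointers.getD (i + 1) 0 ≤ (column_indices.length : Int) ∧
       ∀ j ∈ PySem.List.pyRange (row_pointers.getD i 0) (row_pointers.getD (i + 1) 0) 1,
         0 ≤ column_indices.getD (j % (column_indices.length : Int)).toNat 0 ∧
         column_indices.getD (j % (column_indices.length : Int)).toNat 0 < n))
instance (m : Int) (n : Int) (targets : List String) (column_indices : List Int) (row_pointers : List Int) : Decidable (Pre_war m n targets column_indices row_pointers) := by unfold Pre_war; infer_instance
def pvWitness_war : Int × Int × List String × List Int × List Int := (2, 2, ["a", "b"], [0, 1], [0, 1, 2])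

def Spec_war (m : Int) (n : Int) (targets : List String) (column_indices : List Int) (row_pointers : List Int) (out : List (List String)) : Prop := out = war_alt m n targets column_indices row_pointers
instance (m : Int) (n : Int) (targets : List String) (column_indices : List Int) (row_pointers : List Int) (out : List (List String)) : Decidable (Spec_war m n targets column_indices row_pointers out) := by unfold Spec_war; infer_instance

-- ===== CLAIM (what is proved, stated in full; the proofs are below) =====
def Claim_equal_war : Prop := ∀ (m : Int) (n : Int) (targets : List String) (column_indices : List Int) (row_pointers : List Int), Dom_war m n targets column_indices row_pointers → Pre_war m n targets column_indices row_pointers → Spec_war m n targets column_indices row_pointers (war m n targets column_indices row_pointers)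

-- ===== LEMMAS AND PROOFS =====

lemma pyGetD_pySetD_self (mat : List (List String)) (i : Int) (v : List String)
    (hi : 0 ≤ i) (hlen : i < (mat.length : Int)) :
    PySem.List.pyGetD (PySem.List.pySetD mat i v) i [] = v := by
  rw [PySem.List.pySetD_of_nonneg _ _ hi,
      PySem.List.pyGetD_eq_getElem _ _ hi (by simpa using hlen)]
  exact List.getElem_set_self _

-- the inner scatter loop at a fixed row index collapses to one update of that row
lemma inner_collapse (step : Int → List String → List String) (i : Int) (hi : 0 ≤ i) :
    ∀ (js : List Int) (mat : List (List String)), i < (mat.length : Int) →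
      js.foldl (fun m j => PySem.List.pySetD m i (step j (PySem.List.pyGetD m i []))) mat
        = PySem.List.pySetD mat i
            (js.foldl (fun row j => step j row) (PySem.List.pyGetD mat i [])) := by
  intro js
  induction js with
  | nil =>
    intro mat hlen
    simp only [List.foldl_nil]
    rw [PySem.List.pySetD_of_nonneg _ _ hi, PySem.List.pyGetD_eq_getElem _ _ hi hlen]
    exact (List.set_getElem_self _).symm ▸ rfl
  | cons j js ih =>
    intro mat hlen
    simp only [List.foldl_cons]
    rw [ih _ (by rw [PySem.List.length_pySetD]; exact hlen)]
    rw [pyGetD_pySetD_self _ _ _ hi hlen]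
    rw [PySem.List.pySetD_of_nonneg _ _ hi, PySem.List.pySetD_of_nonneg _ _ hi,
        PySem.List.pySetD_of_nonneg _ _ hi, List.set_set]

-- the outer loop updates row i in place; over a range it is a map over the rows
lemma outer_collapse (js : Int → List Int) (step : Int → Int → List String → List String) :
    ∀ (k : Nat) (a b : Int) (pre : List (List String)) (f : Int → List String),
      0 ≤ a → a.toNat = pre.length → k = (b - a).toNat →
      (PySem.List.pyRange a b 1).foldl
        (fun mat i => (js i).foldl
          (fun m j => PySem.List.pySetD m i (step i j (PySem.List.pyGetD m i []))) mat)
        (pre ++ (PySem.List.pyRange a b 1).map f)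
      = pre ++ (PySem.List.pyRange a b 1).map
          (fun i => (js i).foldl (fun row j => step i j row) (f i)) := by
  intro k
  induction k with
  | zero =>
    intro a b pre f ha hpre hk
    rw [PySem.List.pyRange_one_eq_nil (by omega)]
    simp
  | succ k ih =>
    intro a b pre f ha hpre hk
    have hab : a < b := by omega
    rw [PySem.List.pyRange_one_cons hab]
    simp only [List.map_cons, List.foldl_cons]
    have hlen : a < ((pre ++ f a :: (PySem.List.pyRange (a + 1) b 1).map f).length : Int) := by
      simp; omega
    rw [inner_collapse (step a) a ha _ _ hlen]
    have hget : PySem.List.pyGetD (pre ++ f a :: (PySem.List.pyRange (a + 1) b 1).map f) a [] = f a := by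
      rw [PySem.List.pyGetD_eq_getElem _ _ ha hlen]
      exact List.getElem_of_append rfl hpre.symm
    rw [hget, PySem.List.pySetD_of_nonneg _ _ ha, hpre,
        List.set_append_right _ _ (le_refl _)]
    simp only [Nat.sub_self, List.set_cons_zero]
    rw [List.append_cons pre _ ((PySem.List.pyRange (a + 1) b 1).map f),
        List.append_cons pre _ ((PySem.List.pyRange (a + 1) b 1).map _)]
    exact ih (a + 1) b _ f (by omega) (by simp [← hpre]; omega) (by omega)

-- one row: scattering into a given row equals per-cell reverse-first-match
lemma row_collapse (n : Int) (c : Int → Int) (t : Int → String) :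
    ∀ (js : List Int) (f : Int → String),
      (∀ j ∈ js, 0 ≤ c j ∧ c j < n) →
      js.foldl (fun row j => PySem.List.pySetD row (c j) (t j))
          ((PySem.List.pyRange 0 n 1).map f)
        = (PySem.List.pyRange 0 n 1).map
            (fun x => match js.reverse.find? (fun j => c j == x) with
              | some j => t j
              | none => f x) := by
  intro js
  induction js with
  | nil => intro f _; rfl
  | cons j js ih =>
    intro f h
    obtain ⟨hc0, hcn⟩ := h j (by simp)
    simp only [List.foldl_cons]
    have hstep :
        PySem.List.pySetD ((PySem.List.pyRange 0 n 1).map f) (c j) (t j)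
          = (PySem.List.pyRange 0 n 1).map (fun x => if c j == x then t j else f x) := by
      apply List.ext_getElem
      · simp [PySem.List.length_pySetD]
      · intro k h1 h2
        simp only [PySem.List.pySetD_of_nonneg _ _ hc0, List.getElem_set, List.getElem_map,
          PySem.List.getElem_pyRange_one, beq_iff_eq]
        by_cases hcase : (c j).toNat = k
        · rw [if_pos hcase, if_pos (by omega)]
        · rw [if_neg hcase, if_neg (by omega)]
    rw [hstep, ih _ (fun j' hj' => h j' (by simp [hj']))]
    apply List.map_congr_left
    intro x _
    have hrev : (j :: js).reverse = js.reverse ++ [j] := by simp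
    rw [hrev, List.find?_append]
    cases hfind : js.reverse.find? (fun j' => c j' == x) with
    | some j' => simp
    | none =>
      simp only [Option.none_or]
      by_cases hx : c j == x
      · simp [List.find?, hx]
      · simp [List.find?, hx]

-- a wrapped Python index xs[j] (with -len ≤ j < len) reads position j % len
lemma pyGetD_wrap (xs : List Int) (j : Int) (h : PySem.Raise.InRange xs.length j) :
    PySem.List.pyGetD xs j 0 = xs.getD (j % (xs.length : Int)).toNat 0 := by
  obtain ⟨h1, h2⟩ := h
  by_cases hj : 0 ≤ j
  · rw [Int.emod_eq_of_lt hj h2, PySem.List.pyGetD_eq_getElem _ _ hj h2]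
    exact (List.getD_eq_getElem _ _ (by omega)).symm
  · have e : j % (xs.length : Int) = j + xs.length := by
      have e1 : (j + (xs.length : Int) * 1) % (xs.length : Int) = j % (xs.length : Int) :=
        Int.add_mul_emod_self_left j (xs.length : Int) 1
      rw [mul_one] at e1
      rw [← e1]
      exact Int.emod_eq_of_lt (by omega) (by omega)
    rw [e]
    have hk : j = -(((-j).toNat : Nat) : Int) := by omega
    have hk1 : 0 < (-j).toNat := by omega
    have hk2 : (-j).toNat ≤ xs.length := by omega
    rw [hk, PySem.List.pyGetD_neg_natCast _ _ _ hk1 hk2]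
    rw [List.getD_eq_getElem _ _ (by omega)]
    congr 1
    omega

-- ===== VERDICT (by name: the statement is the Claim_ definition above) =====
theorem war_spec : Claim_equal_war := by
  intro m n targets column_indices row_pointers hDom hPre
  unfold Pre_war at hPre
  show war m n targets column_indices row_pointers = war_alt m n targets column_indices row_pointers
  have hA : war m n targets column_indices row_pointers
      = (PySem.List.pyRange 0 m 1).foldl
          (fun mat i =>
            (PySem.List.pyRange (PySem.List.pyGetD row_pointers i 0) (PySem.List.pyGetD row_pointers (i + 1) 0) 1).foldl
              (fun mat j =>
                PySem.List.pySetD mat i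
                  (PySem.List.pySetD (PySem.List.pyGetD mat i [])
                    (PySem.List.pyGetD column_indices j 0) (PySem.List.pyGetD targets j "")))
              mat)
          ([] ++ (PySem.List.pyRange 0 m 1).map (fun _ => List.replicate n.toNat "z")) := by
    unfold war
    rw [PySem.List.foldl_append_singleton_eq_map (fun _ => List.replicate n.toNat "z")]
  have hB : war_alt m n targets column_indices row_pointers
      = [] ++ (PySem.List.pyRange 0 m 1).map (fun i =>
          (PySem.List.pyRange 0 n 1).map (fun c =>
            match (PySem.List.pyRange (PySem.List.pyGetD row_pointers i 0) (PySem.List.pyGetD row_pointers (i + 1) 0) 1).reverse.find?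
                    (fun j => PySem.List.pyGetD column_indices j 0 == c) with
            | some j => PySem.List.pyGetD targets j ""
            | none => "z")) := by
    unfold war_alt
    rw [PySem.List.foldl_append_singleton_eq_map]
  rw [hA, hB,
      outer_collapse
        (fun i => PySem.List.pyRange (PySem.List.pyGetD row_pointers i 0) (PySem.List.pyGetD row_pointers (i + 1) 0) 1)
        (fun _ j row => PySem.List.pySetD row (PySem.List.pyGetD column_indices j 0) (PySem.List.pyGetD targets j ""))
        (m - 0).toNat 0 m [] (fun _ => List.replicate n.toNat "z") (le_refl 0) rfl rfl]
  simp only [List.nil_append]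
  apply List.map_congr_left
  intro i hi
  have hi' := (PySem.List.mem_pyRange_one).1 hi
  rcases hPre with hm0 | ⟨hmlen, hPre⟩
  · omega
  have hP := hPre i.toNat (List.mem_range.2 (by omega))
  have hinit : List.replicate n.toNat "z"
      = (PySem.List.pyRange 0 n 1).map (fun _ => "z") := by
    rw [show (fun (_ : Int) => "z") = Function.const Int "z" from rfl, List.map_const,
        PySem.List.length_pyRange_one]
    norm_num
  rw [hinit]
  refine row_collapse n _ _ _ (fun _ => "z") (fun j hjmem => ?_)
  have hjm' := (PySem.List.mem_pyRange_one).1 hjmem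
  have hlo : PySem.List.pyGetD row_pointers i 0 = row_pointers.getD i.toNat 0 := by
    rw [PySem.List.pyGetD_eq_getElem _ _ hi'.1 (by omega)]
    exact (List.getD_eq_getElem _ _ (by omega)).symm
  have hhi : PySem.List.pyGetD row_pointers (i + 1) 0 = row_pointers.getD (i.toNat + 1) 0 := by
    have e : (i + 1).toNat = i.toNat + 1 := by omega
    rw [PySem.List.pyGetD_eq_getElem _ _ (by omega) (by omega)]
    simp only [e]
    exact (List.getD_eq_getElem _ _ (by omega)).symm
  rcases hP with hempty | ⟨hT1, hT2, hC1, hC2, hIn⟩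
  · omega
  have hjc' : PySem.Raise.InRange column_indices.length j := ⟨by omega, by omega⟩
  have hwrap := pyGetD_wrap column_indices j hjc'
  obtain ⟨hjc1, hjc2⟩ := hjc'
  have hcr := hIn j ((PySem.List.mem_pyRange_one).2 ⟨by omega, by omega⟩)
  obtain ⟨hcr1, hcr2⟩ := hcr
  exact ⟨by omega, by omega⟩
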